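-- pv_equiv track=rewrite | github.com/jxmai/Online-List-Update | algs/timestamp.py | extract_timestamp_window
-- ===== SOURCE A (Python) =====
-- def extract_timestamp_window(sequence, access_index):
--     timestamp_window = None
--
--     curr_index = access_index - 1
--
--     while curr_index >= 0:
--         if sequence[curr_index] == sequence[access_index]:
--             timestamp_window = sequence[curr_index + 1: access_index]
--             break
--         curr_index -= 1
--     return timestamp_window
-- ===== SOURCE B (Python) =====
-- def extract_timestamp_window(sequence, access_index):
--     # Build a value -> last index map over the prefix in one forward pass,
--     # then answer with a single dictionary lookup (no element-by-element
--     # comparison against sequence[access_index]).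
--     if access_index <= 0:
--         return None
--     last_seen = {}
--     for i in range(access_index):
--         last_seen[sequence[i]] = i
--     prev = last_seen.get(sequence[access_index])
--     if prev is None:
--         return None
--     return sequence[prev + 1: access_index]
-- ===== Notes on version B (the rewrite author's own statement) =====
-- stated objective: alternative
-- what changed: B builds a value->last-index hash map over the prefix in one forward pass and answers with a single dictionary lookup, replacing A's backward scan that compares each element against sequence[access_index].
import Mathlib
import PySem

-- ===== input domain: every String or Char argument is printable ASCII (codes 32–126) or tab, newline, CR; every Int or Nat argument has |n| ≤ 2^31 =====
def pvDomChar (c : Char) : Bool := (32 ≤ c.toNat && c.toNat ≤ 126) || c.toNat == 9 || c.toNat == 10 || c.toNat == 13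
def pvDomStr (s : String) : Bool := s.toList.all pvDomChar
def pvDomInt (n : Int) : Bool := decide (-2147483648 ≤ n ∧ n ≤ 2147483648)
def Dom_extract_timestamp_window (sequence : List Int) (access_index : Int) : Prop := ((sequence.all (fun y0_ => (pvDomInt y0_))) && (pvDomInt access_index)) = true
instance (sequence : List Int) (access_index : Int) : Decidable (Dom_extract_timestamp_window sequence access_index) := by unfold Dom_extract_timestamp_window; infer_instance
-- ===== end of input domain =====

-- B replaces A's backward compare-against-sequence[access_index] scan by a value->last-index
-- dictionary built in one forward pass plus a single lookup (objective: alternative).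


-- ===== PORT A =====
-- A's while-loop: curr counts down from access_index-1; break with the slice at the first match.
def pvAWhile (seq : List Int) (a : Int) (curr : Int) (fuel : Nat) : Option (List Int) :=
  if curr ≥ 0 then
    match fuel with
    | 0 => none
    | fuel + 1 =>
      if PySem.List.pyGet? seq curr = PySem.List.pyGet? seq a then
        some (PySem.List.slice seq (some (curr + 1)) (some a))
      else pvAWhile seq a (curr - 1) fuel
  else none

def extract_timestamp_window (sequence : List Int) (access_index : Int) : Option (List Int) :=
  pvAWhile sequence access_index (access_index - 1) access_index.toNat

-- ===== PORT B =====
-- B: one forward pass filling last_seen[sequence[i]] = i, then one dict lookup.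
-- (pyGet? returning none corresponds to Python's IndexError; those inputs are outside Pre_.)
def extract_timestamp_window_alt (sequence : List Int) (access_index : Int) : Option (List Int) :=
  if access_index ≤ 0 then none
  else
    let last_seen := (PySem.List.pyRange 0 access_index 1).foldl
      (fun d i => match PySem.List.pyGet? sequence i with
        | some v => d.insert v i
        | none => d) (PySem.Dict.empty : PySem.Dict Int Int)
    match PySem.List.pyGet? sequence access_index with
    | none => none
    | some v =>
      match last_seen.get? v with
      | none => none
      | some p => some (PySem.List.slice sequence (some (p + 1)) (some access_index))

-- ===== PRECONDITION & SPEC =====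
-- Pre_ excludes exactly the inputs where Python A raises IndexError:
-- access_index ≥ 1 with access_index ≥ len(sequence) (the loop body indexes out of range).
def Pre_extract_timestamp_window (sequence : List Int) (access_index : Int) : Prop :=
  access_index ≤ 0 ∨ access_index < (sequence.length : Int)
instance (sequence : List Int) (access_index : Int) : Decidable (Pre_extract_timestamp_window sequence access_index) := by unfold Pre_extract_timestamp_window; infer_instance

def pvWitness_extract_timestamp_window : List Int × Int := ([1, 2, 1], 2)

def Spec_extract_timestamp_window (sequence : List Int) (access_index : Int) (out : Option (List Int)) : Prop := out = extract_timestamp_window_alt sequence access_index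
instance (sequence : List Int) (access_index : Int) (out : Option (List Int)) : Decidable (Spec_extract_timestamp_window sequence access_index out) := by unfold Spec_extract_timestamp_window; infer_instance

-- ===== CLAIM (what is proved, stated in full; the proofs are below) =====
def Claim_equal_extract_timestamp_window : Prop := ∀ (sequence : List Int) (access_index : Int), Dom_extract_timestamp_window sequence access_index → Pre_extract_timestamp_window sequence access_index → Spec_extract_timestamp_window sequence access_index (extract_timestamp_window sequence access_index)

-- ===== LEMMAS AND PROOFS =====

-- The forward "keep the last matching index" fold, the common ground of both proofs.
def pvLast (seq : List Int) (v : Int) (n : Int) : Option Int :=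
  (PySem.List.pyRange 0 n 1).foldl
    (fun prev i => if PySem.List.pyGet? seq i = some v then some i else prev) none

lemma pvGet_some (seq : List Int) (n : Nat) (hlt : n < seq.length) :
    PySem.List.pyGet? seq (n : Int) = some seq[n] := by
  rw [PySem.List.pyGet?_natCast]
  exact List.getElem?_eq_getElem hlt

-- A's backward first-match scan computes the slice at the largest matching index below n.
lemma pvAWhile_eq_last (seq : List Int) (a : Int) (v : Int)
    (hv : PySem.List.pyGet? seq a = some v) (n fuel : Nat) (hf : n ≤ fuel) :
    pvAWhile seq a ((n : Int) - 1) fuel =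
      match pvLast seq v (n : Int) with
      | none => none
      | some p => some (PySem.List.slice seq (some (p + 1)) (some a)) := by
  induction n generalizing fuel with
  | zero =>
      rw [pvLast, PySem.List.pyRange_one_eq_nil (by omega)]
      cases fuel <;> simp [pvAWhile]
  | succ n ih =>
      cases fuel with
      | zero => omega
      | succ f =>
        have hcast : ((n + 1 : Nat) : Int) - 1 = (n : Int) := by push_cast; ring
        have hrange : PySem.List.pyRange 0 ((n + 1 : Nat) : Int) 1
            = PySem.List.pyRange 0 (n : Int) 1 ++ [(n : Int)] := by
          have : ((n + 1 : Nat) : Int) = (n : Int) + 1 := by push_cast; ring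
          rw [this, PySem.List.pyRange_one_succ_right (by omega)]
        rw [hcast, pvLast, hrange, List.foldl_append]
        unfold pvAWhile
        rw [if_pos (by omega), hv]
        by_cases h : PySem.List.pyGet? seq (n : Int) = some v
        · simp [h]
        · simp only [h, List.foldl_cons, List.foldl_nil]
          rw [ih f (by omega)]
          simp [pvLast]

-- B's last-seen dictionary answers the same query: its entry at v is the last matching index.
lemma pvDict_get_eq_last (seq : List Int) (v : Int) (n : Nat) (hn : n ≤ seq.length) :
    ((PySem.List.pyRange 0 (n : Int) 1).foldl
      (fun d i => match PySem.List.pyGet? seq i with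
        | some w => d.insert w i
        | none => d) (PySem.Dict.empty : PySem.Dict Int Int)).get? v
      = pvLast seq v (n : Int) := by
  induction n with
  | zero =>
      rw [pvLast, PySem.List.pyRange_one_eq_nil (by omega)]
      simp
  | succ n ih =>
      have hrange : PySem.List.pyRange 0 ((n + 1 : Nat) : Int) 1
          = PySem.List.pyRange 0 (n : Int) 1 ++ [(n : Int)] := by
        have : ((n + 1 : Nat) : Int) = (n : Int) + 1 := by push_cast; ring
        rw [this, PySem.List.pyRange_one_succ_right (by omega)]
      have hget := pvGet_some seq n (by omega)
      rw [pvLast, hrange]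
      simp only [List.foldl_append, List.foldl_cons, List.foldl_nil, hget]
      rw [PySem.Dict.get?_insert, ih (by omega), pvLast]
      split_ifs with hc1 hc2 hc3
      · rfl
      · exact absurd (by rw [hc1]) hc2
      · exact absurd (by injection hc3 with e; exact e.symm) hc1
      · rfl

lemma ports_agree (seq : List Int) (a : Int)
    (hpre : Pre_extract_timestamp_window seq a) :
    extract_timestamp_window seq a = extract_timestamp_window_alt seq a := by
  unfold extract_timestamp_window extract_timestamp_window_alt
  by_cases ha : a ≤ 0
  · rw [if_pos ha]
    unfold pvAWhile
    rw [if_neg (by omega)]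
  · rw [if_neg ha]
    have hlen : a < (seq.length : Int) := by
      rcases hpre with h | h
      · omega
      · exact h
    have h1 : a = ((a.toNat : Nat) : Int) := by omega
    have hlt : a.toNat < seq.length := by omega
    have hget : PySem.List.pyGet? seq a = some seq[a.toNat] := by
      conv_lhs => rw [h1]
      exact pvGet_some seq a.toNat hlt
    rw [hget]
    have hA := pvAWhile_eq_last seq a seq[a.toNat] hget a.toNat a.toNat le_rfl
    rw [← h1] at hA
    rw [hA]
    have hD := pvDict_get_eq_last seq seq[a.toNat] a.toNat (le_of_lt hlt)
    rw [← h1] at hD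
    rw [← hD]

-- ===== VERDICT (by name: the statement is the Claim_ definition above) =====
theorem extract_timestamp_window_spec : Claim_equal_extract_timestamp_window := by
  intro seq a _ hpre
  exact ports_agree seq a hpre
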